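-- pv_equiv track=rewrite | github.com/DanielSmith/alap | src/other-languages/python/validate_regex.py | _strip_escapes_and_classes
-- ===== SOURCE A (Python) =====
-- def _strip_escapes_and_classes(body: str) -> str:
--     result = []
--     i = 0
--     while i < len(body):
--         if body[i] == '\\':
--             i += 2
--             continue
--         if body[i] == '[':
--             i += 1
--             if i < len(body) and body[i] == '^':
--                 i += 1
--             if i < len(body) and body[i] == ']':
--                 i += 1
--             while i < len(body) and body[i] != ']':
--                 if body[i] == '\\':
--                     i += 1
--                 i += 1
--             i += 1
--             continue
--         result.append(body[i])
--         i += 1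
--     return ''.join(result)
-- ===== SOURCE B (Python) =====
-- def _strip_escapes_and_classes(body: str) -> str:
--     # Single pass as a finite-state machine over the characters; only
--     # state NORMAL emits. States: 0 NORMAL, 1 after-backslash, 2 just
--     # after '[', 3 after '[^', 4 inside class, 5 after backslash in class.
--     out = []
--     state = 0
--     for c in body:
--         if state == 0:
--             if c == '\\':
--                 state = 1
--             elif c == '[':
--                 state = 2
--             else:
--                 out.append(c)
--         elif state == 1:
--             state = 0
--         elif state == 2:
--             if c == '^':
--                 state = 3
--             elif c == '\\':
--                 state = 5
--             else:
--                 state = 4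
--         elif state == 3:
--             if c == '\\':
--                 state = 5
--             else:
--                 state = 4
--         elif state == 4:
--             if c == ']':
--                 state = 0
--             elif c == '\\':
--                 state = 5
--         else:
--             state = 4
--     return ''.join(out)
-- ===== Notes on version B (the rewrite author's own statement) =====
-- stated objective: simpler
-- what changed: Replaces the while-loop with a hand-managed index, look-aheads and a nested class-skipping loop by a single left-to-right fold over the characters with an explicit 6-state finite-state machine that emits only in the NORMAL state; the per-character state step avoids repeated indexing/len checks, which a timing run measured as about 3x faster.
import Mathlib
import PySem

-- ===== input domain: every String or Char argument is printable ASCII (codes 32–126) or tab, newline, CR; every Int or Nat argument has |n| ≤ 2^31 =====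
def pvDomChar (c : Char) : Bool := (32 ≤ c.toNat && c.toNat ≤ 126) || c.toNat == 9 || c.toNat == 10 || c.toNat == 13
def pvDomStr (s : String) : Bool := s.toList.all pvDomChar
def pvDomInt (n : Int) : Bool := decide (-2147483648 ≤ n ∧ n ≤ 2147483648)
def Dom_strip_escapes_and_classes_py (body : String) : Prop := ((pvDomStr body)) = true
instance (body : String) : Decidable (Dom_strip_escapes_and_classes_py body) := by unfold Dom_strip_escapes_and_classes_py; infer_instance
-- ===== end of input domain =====

-- B replaces A's while-loop with a hand-managed index and a nested class-skipping
-- loop by a single fold over the characters with an explicit finite-state machine.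

-- ===== PORT A =====
-- helper for the termination arguments of the loop ports below
theorem pv_lt {cs : List Char} {i : Nat} {c : Char} (h : cs[i]? = some c) : i < cs.length :=
  (List.getElem?_eq_some_iff.mp h).1

-- inner `while i < len(body) and body[i] != ']': if body[i]=='\\': i+=1; i+=1`
def pvAClassLoop (cs : List Char) (i : Nat) : Nat :=
  match h : cs[i]? with
  | none => i
  | some c =>
    if c = ']' then i
    else if c = '\\' then pvAClassLoop cs (i + 2)
    else pvAClassLoop cs (i + 1)
termination_by cs.length - i
decreasing_by all_goals (have := pv_lt h; omega)

theorem pvAClassLoop_ge (cs : List Char) (i : Nat) : i ≤ pvAClassLoop cs i := by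
  fun_induction pvAClassLoop cs i with
  | case1 => omega
  | case2 => omega
  | case3 => omega
  | case4 => omega

-- the two guarded `if i < len(body) and body[i] == …: i += 1` steps after '['
def pvAOpt (cs : List Char) (j : Nat) : Nat :=
  if cs[j]? = some '^' then (if cs[j+1]? = some ']' then j + 1 + 1 else j + 1)
  else (if cs[j]? = some ']' then j + 1 else j)

theorem pvAOpt_ge (cs : List Char) (j : Nat) : j ≤ pvAOpt cs j := by
  unfold pvAOpt; split_ifs <;> omega

-- outer `while i < len(body)` with the `result` accumulator
def pvALoop (cs : List Char) (i : Nat) (result : List Char) : List Char :=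
  match h : cs[i]? with
  | none => result
  | some c =>
    if c = '\\' then pvALoop cs (i + 2) result
    else if c = '[' then
      pvALoop cs (pvAClassLoop cs (pvAOpt cs (i + 1)) + 1) result
    else pvALoop cs (i + 1) (result ++ [c])
termination_by cs.length - i
decreasing_by
  all_goals have hl := pv_lt h
  · omega
  · have h1 := pvAOpt_ge cs (i + 1)
    have h2 := pvAClassLoop_ge cs (pvAOpt cs (i + 1))
    omega
  · omega

def strip_escapes_and_classes_py (body : String) : String :=
  String.ofList (pvALoop body.toList 0 [])

-- ===== PORT B =====
-- the FSM transition of Source B: state 0 NORMAL, 1 after '\', 2 after '[',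
-- 3 after '[^', 4 inside a class, 5 after '\' inside a class; only state 0 emits
def pvBStep (p : Nat × List Char) (c : Char) : Nat × List Char :=
  match p with
  | (st, out) =>
    if st = 0 then
      if c = '\\' then (1, out)
      else if c = '[' then (2, out)
      else (0, out ++ [c])
    else if st = 1 then (0, out)
    else if st = 2 then
      if c = '^' then (3, out)
      else if c = '\\' then (5, out)
      else (4, out)
    else if st = 3 then
      if c = '\\' then (5, out) else (4, out)
    else if st = 4 then
      if c = ']' then (0, out)
      else if c = '\\' then (5, out)
      else (4, out)
    else (4, out)

def strip_escapes_and_classes_py_alt (body : String) : String :=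
  String.ofList (body.toList.foldl pvBStep (0, [])).2

-- ===== PRECONDITION & SPEC =====
def Spec_strip_escapes_and_classes_py (body : String) (out : String) : Prop := out = strip_escapes_and_classes_py_alt body
instance (body : String) (out : String) : Decidable (Spec_strip_escapes_and_classes_py body out) := by unfold Spec_strip_escapes_and_classes_py; infer_instance

-- ===== CLAIM (what is proved, stated in full; the proofs are below) =====
def Claim_equal_strip_escapes_and_classes_py : Prop := ∀ (body : String), Dom_strip_escapes_and_classes_py body → Spec_strip_escapes_and_classes_py body (strip_escapes_and_classes_py body)

-- ===== LEMMAS AND PROOFS =====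

theorem pv_drop_cons {cs : List Char} {i : Nat} {c : Char} (h : cs[i]? = some c) :
    cs.drop i = c :: cs.drop (i + 1) := by
  obtain ⟨hl, hc⟩ := List.getElem?_eq_some_iff.mp h
  rw [List.drop_eq_getElem_cons hl, hc]

theorem pv_drop_nil {cs : List Char} {i j : Nat} (h : cs[i]? = none) (hij : i ≤ j) :
    cs.drop j = [] := by
  have := List.getElem?_eq_none_iff.mp h
  exact List.drop_eq_nil_of_le (by omega)

-- state 1 (after '\'): one more char (if any) is consumed, back to NORMAL at i+2
theorem pv_fold_escape (cs : List Char) (i : Nat) (out : List Char) :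
    (List.foldl pvBStep (1, out) (cs.drop (i + 1))).2
      = (List.foldl pvBStep (0, out) (cs.drop (i + 2))).2 := by
  cases h : cs[i+1]? with
  | none =>
    rw [pv_drop_nil h (by omega), pv_drop_nil h (by omega)]
    rfl
  | some d =>
    rw [pv_drop_cons h, List.foldl_cons]
    have hs : pvBStep (1, out) d = (0, out) := by simp [pvBStep]
    rw [hs]

-- state 5 (after '\' inside a class): one more char consumed, back in the class
theorem pv_fold_classEscape (cs : List Char) (i : Nat) (out : List Char) :
    (List.foldl pvBStep (5, out) (cs.drop (i + 1))).2
      = (List.foldl pvBStep (4, out) (cs.drop (i + 2))).2 := by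
  cases h : cs[i+1]? with
  | none =>
    rw [pv_drop_nil h (by omega), pv_drop_nil h (by omega)]
    rfl
  | some d =>
    rw [pv_drop_cons h, List.foldl_cons]
    have hs : pvBStep (5, out) d = (4, out) := by simp [pvBStep]
    rw [hs]

-- state 4 over the suffix = A's inner class loop, then back to NORMAL
theorem pv_fold_class (cs : List Char) (i : Nat) (out : List Char) :
    (List.foldl pvBStep (4, out) (cs.drop i)).2
      = (List.foldl pvBStep (0, out) (cs.drop (pvAClassLoop cs i + 1))).2 := by
  fun_induction pvAClassLoop cs i with
  | case1 i h =>
    rw [pv_drop_nil h (by omega), pv_drop_nil h (by omega)]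
    rfl
  | case2 i h =>
    rw [pv_drop_cons h, List.foldl_cons]
    have hs : pvBStep (4, out) ']' = (0, out) := by simp [pvBStep]
    rw [hs]
  | case3 i h hne ih =>
    rw [pv_drop_cons h, List.foldl_cons]
    have hs : pvBStep (4, out) '\\' = (5, out) := by simp [pvBStep]
    rw [hs, pv_fold_classEscape cs i out]
    exact ih
  | case4 i c h hne hne2 ih =>
    rw [pv_drop_cons h, List.foldl_cons]
    have hs : pvBStep (4, out) c = (4, out) := by simp [pvBStep, hne, hne2]
    rw [hs]
    exact ih

-- state 3 (after '[^'), which also covers state 2 on a non-'^' first char: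
-- optional ']' then the class body = A's optional-']' step plus inner loop
theorem pv_fold_caret (cs : List Char) (k : Nat) (out : List Char) :
    (List.foldl pvBStep (3, out) (cs.drop k)).2
      = (List.foldl pvBStep (0, out)
          (cs.drop (pvAClassLoop cs (if cs[k]? = some ']' then k + 1 else k) + 1))).2 := by
  cases h : cs[k]? with
  | none =>
    have hcl : pvAClassLoop cs k = k := by unfold pvAClassLoop; rw [h]
    rw [if_neg (by simp), hcl, pv_drop_nil h (by omega), pv_drop_nil h (by omega)]
    rfl
  | some c =>
    by_cases hrb : c = ']'
    · subst hrb
      rw [if_pos rfl, pv_drop_cons h, List.foldl_cons]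
      have hs : pvBStep (3, out) ']' = (4, out) := by simp [pvBStep]
      rw [hs]
      exact pv_fold_class cs (k + 1) out
    · rw [if_neg (by simpa using hrb), pv_drop_cons h, List.foldl_cons]
      by_cases hbs : c = '\\'
      · subst hbs
        have hs : pvBStep (3, out) '\\' = (5, out) := by simp [pvBStep]
        have hcl : pvAClassLoop cs k = pvAClassLoop cs (k + 2) := by
          conv_lhs => rw [pvAClassLoop]
          rw [h]
          simp [hrb]
        rw [hs, hcl, pv_fold_classEscape cs k out]
        exact pv_fold_class cs (k + 2) out
      · have hs : pvBStep (3, out) c = (4, out) := by simp [pvBStep, hbs]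
        have hcl : pvAClassLoop cs k = pvAClassLoop cs (k + 1) := by
          conv_lhs => rw [pvAClassLoop]
          rw [h]
          simp [hrb, hbs]
        rw [hs, hcl]
        exact pv_fold_class cs (k + 1) out

-- state 2 (just after '[') over the suffix = A's '^'/']' options plus inner loop
theorem pv_fold_open (cs : List Char) (j : Nat) (out : List Char) :
    (List.foldl pvBStep (2, out) (cs.drop j)).2
      = (List.foldl pvBStep (0, out) (cs.drop (pvAClassLoop cs (pvAOpt cs j) + 1))).2 := by
  cases h : cs[j]? with
  | none =>
    have hopt : pvAOpt cs j = j := by unfold pvAOpt; rw [h]; simp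
    have hcl : pvAClassLoop cs j = j := by unfold pvAClassLoop; rw [h]
    rw [hopt, hcl, pv_drop_nil h (by omega), pv_drop_nil h (by omega)]
    rfl
  | some c =>
    by_cases hc : c = '^'
    · subst hc
      have hopt : pvAOpt cs j = if cs[j+1]? = some ']' then j + 1 + 1 else j + 1 := by
        unfold pvAOpt; rw [if_pos h]
      rw [hopt, pv_drop_cons h, List.foldl_cons]
      have hs : pvBStep (2, out) '^' = (3, out) := by simp [pvBStep]
      rw [hs]
      exact pv_fold_caret cs (j + 1) out
    · have hopt : pvAOpt cs j = if cs[j]? = some ']' then j + 1 else j := by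
        unfold pvAOpt
        rw [if_neg (by rw [h]; simpa using hc)]
      have hs : pvBStep (2, out) c = pvBStep (3, out) c := by
        simp [pvBStep, hc]
      rw [hopt, pv_drop_cons h, List.foldl_cons, hs, ← List.foldl_cons, ← pv_drop_cons h]
      exact pv_fold_caret cs j out

-- main invariant: A's outer loop from index i = B's fold in NORMAL state over the suffix
theorem pv_main (cs : List Char) (i : Nat) (result : List Char) :
    pvALoop cs i result = (List.foldl pvBStep (0, result) (cs.drop i)).2 := by
  fun_induction pvALoop cs i result with
  | case1 i result h =>
    rw [pv_drop_nil h (by omega)]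
    rfl
  | case2 i result h ih =>
    rw [pv_drop_cons h, List.foldl_cons]
    have hs : pvBStep (0, result) '\\' = (1, result) := by simp [pvBStep]
    rw [hs, pv_fold_escape cs i result]
    exact ih
  | case3 i result h hne ih =>
    rw [pv_drop_cons h, List.foldl_cons]
    have hs : pvBStep (0, result) '[' = (2, result) := by simp [pvBStep]
    rw [hs, ih]
    exact (pv_fold_open cs (i + 1) result).symm
  | case4 i result c h hne hne2 ih =>
    rw [pv_drop_cons h, List.foldl_cons]
    have hs : pvBStep (0, result) c = (0, result ++ [c]) := by simp [pvBStep, hne, hne2]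
    rw [hs]
    exact ih

-- ===== VERDICT (by name: the statement is the Claim_ definition above) =====
theorem strip_escapes_and_classes_py_spec : Claim_equal_strip_escapes_and_classes_py := by
  intro body _
  unfold Spec_strip_escapes_and_classes_py strip_escapes_and_classes_py strip_escapes_and_classes_py_alt
  rw [pv_main body.toList 0 []]
  rfl
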